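-- pv_equiv track=rewrite | github.com/filippak/rc-answer-generation | model/evaluation/eval.py | prediction_output_partial
-- ===== SOURCE A (Python) =====
-- def prediction_output_partial(output):
--     """
--     Function that given the predicted labels, updates the labels to fit intended data output format.
--     Specifically, corrects predicted answer spans that start with a 2, to instead start with a 1
--
--     Input: array of labels
--     Output: array of corrected labels
--     """
--     corrected_output = []
--     prev_label = 0
--     for idx, label in enumerate(output):
--         if label == 2 and prev_label == 0:
--             corrected_output.append(1)
--             prev_label = 1
--         else:
--             corrected_output.append(label)
--             prev_label = label
--     return corrected_output
-- ===== SOURCE B (Python) =====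
-- def prediction_output_partial(output):
--     # Stateless formulation: an element is corrected 2->1 exactly when the
--     # ORIGINAL previous element is 0 (the correction never produces a 0),
--     # so pair each label with its predecessor (0 before the first).
--     prevs = [0] + output[:-1]
--     return [1 if v == 2 and p == 0 else v for v, p in zip(output, prevs)]
-- ===== Notes on version B (the rewrite author's own statement) =====
-- stated objective: simpler
-- what changed: Replaced the stateful loop threading a prev_label accumulator by a stateless comprehension zipping each label with its original predecessor (valid since the correction 2->1 never changes whether the previous label is 0).
import Mathlib
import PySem

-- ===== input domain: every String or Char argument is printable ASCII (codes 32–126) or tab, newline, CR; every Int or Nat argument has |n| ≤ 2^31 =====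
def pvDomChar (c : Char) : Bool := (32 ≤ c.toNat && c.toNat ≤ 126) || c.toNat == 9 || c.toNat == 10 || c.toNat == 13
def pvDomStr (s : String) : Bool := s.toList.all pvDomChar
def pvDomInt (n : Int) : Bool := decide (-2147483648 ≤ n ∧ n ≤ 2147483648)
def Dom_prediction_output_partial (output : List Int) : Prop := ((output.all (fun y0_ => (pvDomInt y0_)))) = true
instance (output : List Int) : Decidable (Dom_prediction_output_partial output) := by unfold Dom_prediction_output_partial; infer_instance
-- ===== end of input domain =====

-- B replaces A's stateful prev_label loop by a stateless zip of each label with its original predecessor (simpler decomposition, same O(n) cost).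


-- ===== PORT A =====
-- literal transliteration: for-loop appending to corrected_output, threading prev_label
def prediction_output_partial (output : List Int) : List Int :=
  (output.foldl
    (fun (st : List Int × Int) label =>
      if label = 2 ∧ st.2 = 0 then (st.1 ++ [1], 1)
      else (st.1 ++ [label], label))
    ([], 0)).1

-- ===== PORT B =====
-- literal transliteration of Source B: prevs = [0] + output[:-1]; zip comprehension
def prediction_output_partial_alt (output : List Int) : List Int :=
  List.zipWith (fun v p => if v = 2 ∧ p = 0 then 1 else v) output
    ((0 : Int) :: PySem.List.slice output none (some (-1)))

-- ===== PRECONDITION & SPEC =====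
def Spec_prediction_output_partial (output : List Int) (out : List Int) : Prop := out = prediction_output_partial_alt output
instance (output : List Int) (out : List Int) : Decidable (Spec_prediction_output_partial output out) := by unfold Spec_prediction_output_partial; infer_instance

-- ===== CLAIM (what is proved, stated in full; the proofs are below) =====
def Claim_equal_prediction_output_partial : Prop := ∀ (output : List Int), Dom_prediction_output_partial output → Spec_prediction_output_partial output (prediction_output_partial output)

-- ===== LEMMAS AND PROOFS =====

-- zipWith against (prev :: l) only looks at whether prev = 0
theorem pv_head_irrel (l : List Int) (p q : Int) (hp : p ≠ 0) (hq : q ≠ 0) :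
    List.zipWith (fun v r => if v = 2 ∧ r = 0 then 1 else v) l (p :: l)
  = List.zipWith (fun v r => if v = 2 ∧ r = 0 then 1 else v) l (q :: l) := by
  cases l with
  | nil => rfl
  | cons h t => simp [List.zipWith, hp, hq]

-- main loop invariant: A's fold from (acc, prev) produces acc ++ B's zip with prev prepended
theorem pv_loop (l : List Int) : ∀ (acc : List Int) (prev : Int),
    (l.foldl
      (fun (st : List Int × Int) label =>
        if label = 2 ∧ st.2 = 0 then (st.1 ++ [1], 1)
        else (st.1 ++ [label], label))
      (acc, prev)).1
  = acc ++ List.zipWith (fun v p => if v = 2 ∧ p = 0 then 1 else v) l (prev :: l) := by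
  induction l with
  | nil => intro acc prev; simp
  | cons h t ih =>
    intro acc prev
    by_cases hc : h = 2 ∧ prev = 0
    · simp only [List.foldl, hc, List.zipWith]
      rw [ih]
      have : List.zipWith (fun v r => if v = 2 ∧ r = 0 then 1 else v) t ((1 : Int) :: t)
           = List.zipWith (fun v r => if v = 2 ∧ r = 0 then 1 else v) t (h :: t) := by
        exact pv_head_irrel t 1 h (by norm_num) (by omega)
      simp [this, hc.1]
    · simp only [List.foldl, if_neg hc, List.zipWith]
      rw [ih]
      simp

theorem pv_slice_dropLast (l : List Int) :
    PySem.List.slice l none (some (-1)) = l.dropLast := by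
  exact PySem.List.slice_to_neg_one l

theorem pv_zip_dropLast (l : List Int) (prev : Int)
    (f : Int → Int → Int) :
    List.zipWith f l (prev :: l.dropLast) = List.zipWith f l (prev :: l) := by
  induction l generalizing prev with
  | nil => rfl
  | cons h t ih =>
    cases t with
    | nil => rfl
    | cons h2 t2 => simp [List.zipWith, ih]

-- ===== VERDICT (by name: the statement is the Claim_ definition above) =====
theorem prediction_output_partial_spec : Claim_equal_prediction_output_partial := by
  intro output _
  unfold Spec_prediction_output_partial prediction_output_partial prediction_output_partial_alt
  rw [pv_loop, pv_slice_dropLast, pv_zip_dropLast]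
  simp
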